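-- pv_equiv track=rewrite | github.com/lanxia404/Crescent | scripts/build_corpus.py | should_drop_line
-- ===== SOURCE A (Python) =====
-- from typing import Generator, List, Set, Tuple
--
-- def should_drop_line(line_norm: str, title_norms: Set[str], min_len: int) -> bool:
--     if not line_norm:
--         return True
--     if len(line_norm) < min_len:
--         return True
--     if line_norm in title_norms:
--         return True
--     for t in title_norms:
--         if t and (line_norm.startswith(t) and (len(line_norm) <= len(t) + 10)):
--             return True
--     return False
-- ===== SOURCE B (Python) =====
-- def should_drop_line(line_norm: str, title_norms, min_len: int) -> bool:
--     n = len(line_norm)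
--     if n == 0 or n < min_len:
--         return True
--     for k in range(max(1, n - 10), n + 1):
--         if line_norm[:k] in title_norms:
--             return True
--     return False
-- ===== Notes on version B (the rewrite author's own statement) =====
-- stated objective: faster
-- what changed: Instead of scanning every title and running startswith on each, B tests only the at most 11 admissible prefixes of the line (lengths max(1, len-10)..len) for membership in the title set, which also subsumes the separate exact-membership check.
import Mathlib
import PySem

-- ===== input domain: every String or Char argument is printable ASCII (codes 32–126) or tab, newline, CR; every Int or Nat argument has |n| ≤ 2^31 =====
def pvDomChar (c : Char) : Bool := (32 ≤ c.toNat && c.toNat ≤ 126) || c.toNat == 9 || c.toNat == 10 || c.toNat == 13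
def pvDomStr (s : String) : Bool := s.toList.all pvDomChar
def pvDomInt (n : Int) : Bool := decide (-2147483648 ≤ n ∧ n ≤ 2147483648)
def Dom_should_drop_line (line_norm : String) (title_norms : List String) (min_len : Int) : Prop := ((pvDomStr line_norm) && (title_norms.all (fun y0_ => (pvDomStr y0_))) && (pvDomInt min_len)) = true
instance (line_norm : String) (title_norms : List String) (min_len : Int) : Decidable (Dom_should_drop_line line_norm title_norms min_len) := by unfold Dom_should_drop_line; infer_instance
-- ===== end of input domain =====

-- B replaces A's scan over all titles (each with a startswith over the line) by a
-- membership test of the ≤ 11 admissible prefixes of the line — objective: faster.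

-- ===== PORT A =====
-- literal transliteration of A: empty check, length check, set membership, then a
-- scan over the titles with early return (the for/return-True loop is List.any).
def should_drop_line (line_norm : String) (title_norms : List String) (min_len : Int) : Bool :=
  if line_norm.toList.isEmpty then true
  else if PySem.Str.len line_norm < min_len then true
  else if title_norms.contains line_norm then true
  else
    title_norms.any (fun t =>
      !t.toList.isEmpty && PySem.Str.startswith line_norm t
        && decide (PySem.Str.len line_norm ≤ PySem.Str.len t + 10))

-- ===== PORT B =====
-- literal transliteration of Source B: one range over candidate prefix lengths,
-- membership test of each prefix line_norm[:k].
def should_drop_line_alt (line_norm : String) (title_norms : List String) (min_len : Int) : Bool :=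
  let n : Int := PySem.Str.len line_norm
  if n == 0 || n < min_len then true
  else
    (PySem.List.pyRange (max 1 (n - 10)) (n + 1)).any (fun k =>
      title_norms.contains (PySem.Str.slice line_norm none (some k)))

-- ===== PRECONDITION & SPEC =====
def Spec_should_drop_line (line_norm : String) (title_norms : List String) (min_len : Int) (out : Bool) : Prop := out = should_drop_line_alt line_norm title_norms min_len
instance (line_norm : String) (title_norms : List String) (min_len : Int) (out : Bool) : Decidable (Spec_should_drop_line line_norm title_norms min_len out) := by unfold Spec_should_drop_line; infer_instance

-- ===== CLAIM (what is proved, stated in full; the proofs are below) =====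
def Claim_equal_should_drop_line : Prop := ∀ (line_norm : String) (title_norms : List String) (min_len : Int), Dom_should_drop_line line_norm title_norms min_len → Spec_should_drop_line line_norm title_norms min_len (should_drop_line line_norm title_norms min_len)

-- ===== LEMMAS AND PROOFS =====

-- The core bridge: for a nonempty line, "line_norm is in the set, or some nonempty
-- title is a prefix of it of length ≥ len - 10" is exactly "some prefix of length
-- k ∈ [max 1 (len-10), len] is in the set".
theorem drop_core (line_norm : String) (title_norms : List String)
    (hne : line_norm.toList ≠ []) :
    (title_norms.contains line_norm
      || title_norms.any (fun t =>
          !t.toList.isEmpty && PySem.Str.startswith line_norm t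
            && decide (PySem.Str.len line_norm ≤ PySem.Str.len t + 10)))
    = (PySem.List.pyRange (max 1 ((line_norm.toList.length : Int) - 10))
        ((line_norm.toList.length : Int) + 1)).any (fun k =>
          title_norms.contains (PySem.Str.slice line_norm none (some k))) := by
  have hlen : 0 < line_norm.toList.length := List.length_pos_iff.mpr hne
  have hlen1 : (1:Int) ≤ (line_norm.toList.length : Int) := by exact_mod_cast hlen
  apply Bool.eq_iff_iff.mpr
  simp only [Bool.or_eq_true, List.contains_iff_mem, List.any_eq_true,
    Bool.and_eq_true, Bool.not_eq_eq_eq_not, Bool.not_true, List.isEmpty_eq_false_iff,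
    PySem.Str.startswith_eq, PySem.Chars.startswith_iff, decide_eq_true_eq,
    PySem.Str.len_eq, PySem.List.mem_pyRange_one]
  have hslice : ∀ k : Int, 0 ≤ k →
      (PySem.Str.slice line_norm none (some k)).toList = line_norm.toList.take k.toNat := by
    intro k hk
    rw [PySem.Str.toList_slice, PySem.Chars.slice_eq_listSlice, PySem.List.slice_to _ hk]
  constructor
  · rintro (hmem | ⟨t, ht, ⟨htne, hpre⟩, hle⟩)
    · have hb1 : max 1 ((line_norm.toList.length : Int) - 10) ≤ (line_norm.toList.length : Int) :=
        max_le hlen1 (by omega)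
      have hb2 : (line_norm.toList.length : Int) < (line_norm.toList.length : Int) + 1 := by omega
      have hfull : PySem.Str.slice line_norm none (some (line_norm.toList.length : Int)) = line_norm := by
        apply String.toList_injective
        rw [hslice _ (Int.natCast_nonneg _)]
        simp
      exact ⟨(line_norm.toList.length : Int), ⟨hb1, hb2⟩, by rwa [hfull]⟩
    · have hplen : t.toList.length ≤ line_norm.toList.length := hpre.length_le
      have hplen' : (t.toList.length : Int) ≤ (line_norm.toList.length : Int) := by exact_mod_cast hplen
      have htpos : 0 < t.toList.length := List.length_pos_iff.mpr htne
      have htpos' : (1:Int) ≤ (t.toList.length : Int) := by exact_mod_cast htpos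
      have hb1 : max 1 ((line_norm.toList.length : Int) - 10) ≤ (t.toList.length : Int) :=
        max_le htpos' (by omega)
      have hteq : PySem.Str.slice line_norm none (some (t.toList.length : Int)) = t := by
        apply String.toList_injective
        rw [hslice _ (Int.natCast_nonneg _)]
        simp only [Int.toNat_natCast]
        exact (List.prefix_iff_eq_take.mp hpre).symm
      exact ⟨(t.toList.length : Int), ⟨hb1, by omega⟩, by rwa [hteq]⟩
  · rintro ⟨k, ⟨hk1, hk2⟩, hmem⟩
    have hk1' : (1:Int) ≤ k := le_trans (le_max_left _ _) hk1
    have hk10 : (line_norm.toList.length : Int) - 10 ≤ k := le_trans (le_max_right _ _) hk1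
    have hkl : k.toNat ≤ line_norm.toList.length := by omega
    have hts := hslice k (by omega)
    right
    refine ⟨_, hmem, ⟨?_, ?_⟩, ?_⟩
    · rw [hts]
      refine List.length_pos_iff.mp ?_
      rw [List.length_take, Nat.min_def]
      split_ifs
      omega
    · rw [hts]; exact List.take_prefix _ _
    · rw [hts, List.length_take]
      have hm : line_norm.toList.length ≤ min k.toNat line_norm.toList.length + 10 := by
        rw [Nat.min_def]
        split_ifs
        omega
      exact_mod_cast hm

-- ===== VERDICT (by name: the statement is the Claim_ definition above) =====
theorem should_drop_line_spec : Claim_equal_should_drop_line := by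
  intro line_norm title_norms min_len _
  show should_drop_line _ _ _ = should_drop_line_alt _ _ _
  simp only [should_drop_line, should_drop_line_alt, PySem.Str.len_eq]
  by_cases hne : line_norm.toList = []
  · simp [hne]
  · have hlen : 0 < line_norm.toList.length := List.length_pos_iff.mpr hne
    rw [if_neg (by simp [hne])]
    have hz : (((line_norm.toList.length : Int)) == 0) = false := by
      simp only [beq_eq_false_iff_ne, ne_eq]
      omega
    rw [hz, Bool.false_or]
    simp only [decide_eq_true_eq]
    by_cases hml : (line_norm.toList.length : Int) < min_len
    · rw [if_pos hml, if_pos hml]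
    · rw [if_neg hml, if_neg hml]
      rw [← drop_core line_norm title_norms hne]
      by_cases hc : title_norms.contains line_norm = true
      · rw [if_pos hc, hc, Bool.true_or]
      · rw [if_neg hc, Bool.eq_false_iff.mpr hc, Bool.false_or]
        simp only [PySem.Str.len_eq]
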